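-- pv_equiv track=rewrite | github.com/mustafa174/Employee-Handbook-Q-A | rag-api/app/rag_graph.py | _extract_best_section
-- ===== SOURCE A (Python) =====
-- def _extract_best_section(full_text: str, fallback: str) -> str:
--     lines = [ln.strip() for ln in full_text.splitlines() if ln.strip()]
--     # Prefer the most specific visible subsection.
--     for ln in lines:
--         if ln.startswith("### "):
--             return ln[4:].strip()
--     for ln in lines:
--         if ln.startswith("## "):
--             return ln[3:].strip()
--     for ln in lines:
--         if ln.startswith("# "):
--             return ln[2:].strip()
--     return fallback
-- ===== SOURCE B (Python) =====
-- def _extract_best_section(full_text: str, fallback: str) -> str: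
--     # Single pass: return immediately on the first '### ' header; otherwise
--     # remember the first '## ' and first '# ' headers seen and pick by level.
--     h2 = None
--     h1 = None
--     for raw in full_text.splitlines():
--         ln = raw.strip()
--         if not ln:
--             continue
--         if ln.startswith("### "):
--             return ln[4:].strip()
--         if ln.startswith("## "):
--             if h2 is None:
--                 h2 = ln[3:].strip()
--         elif ln.startswith("# "):
--             if h1 is None:
--                 h1 = ln[2:].strip()
--     if h2 is not None:
--         return h2
--     if h1 is not None:
--         return h1
--     return fallback
-- ===== Notes on version B (the rewrite author's own statement) =====
-- stated objective: alternative
-- what changed: Replaces A's build-a-filtered-list-then-three-sequential-scans with a single streaming pass over the raw lines that returns on the first '### ' header and otherwise remembers only the first '## ' and first '# ' candidates, picking the best at the end.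
import Mathlib
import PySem

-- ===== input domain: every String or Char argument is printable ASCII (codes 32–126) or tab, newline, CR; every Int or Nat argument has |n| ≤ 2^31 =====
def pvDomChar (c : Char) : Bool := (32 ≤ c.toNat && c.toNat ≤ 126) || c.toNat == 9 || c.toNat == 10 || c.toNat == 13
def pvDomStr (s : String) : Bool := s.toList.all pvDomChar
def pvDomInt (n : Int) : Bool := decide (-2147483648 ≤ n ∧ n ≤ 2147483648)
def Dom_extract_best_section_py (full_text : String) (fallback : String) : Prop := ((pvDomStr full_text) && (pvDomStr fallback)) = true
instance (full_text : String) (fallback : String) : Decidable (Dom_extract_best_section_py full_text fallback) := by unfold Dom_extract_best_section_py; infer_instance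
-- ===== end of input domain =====

-- B replaces A's build-filtered-list-then-three-scans with a single streaming pass
-- (early return on '### ', first '## '/'# ' remembered) — objective: alternative (same cost).


-- ===== PORT A =====
-- A: strip every line, keep the non-empty ones, then three sequential scans
-- ('### ' first, then '## ', then '# '), each for-with-return rendered as List.find?.
def extract_best_section_py (full_text : String) (fallback : String) : String :=
  let lines := ((PySem.Str.splitlines full_text).map PySem.Str.strip).filter (fun l => l != "")
  match lines.find? (fun ln => PySem.Str.startswith ln "### ") with
  | some ln => PySem.Str.strip (PySem.Str.slice ln (some 4) none)
  | none =>
    match lines.find? (fun ln => PySem.Str.startswith ln "## ") with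
    | some ln => PySem.Str.strip (PySem.Str.slice ln (some 3) none)
    | none =>
      match lines.find? (fun ln => PySem.Str.startswith ln "# ") with
      | some ln => PySem.Str.strip (PySem.Str.slice ln (some 2) none)
      | none => fallback

-- ===== PORT B =====
-- B: one recursive pass over the raw lines carrying the first '## ' and '# ' candidates.
def ebsLoop (fallback : String) : List String → Option String → Option String → String
  | [], h2, h1 =>
    match h2 with
    | some s => s
    | none => match h1 with | some s => s | none => fallback
  | raw :: rest, h2, h1 =>
    let ln := PySem.Str.strip raw
    if ln == "" then ebsLoop fallback rest h2 h1
    else if PySem.Str.startswith ln "### " then PySem.Str.strip (PySem.Str.slice ln (some 4) none)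
    else if PySem.Str.startswith ln "## " then
      ebsLoop fallback rest (if h2.isNone then some (PySem.Str.strip (PySem.Str.slice ln (some 3) none)) else h2) h1
    else if PySem.Str.startswith ln "# " then
      ebsLoop fallback rest h2 (if h1.isNone then some (PySem.Str.strip (PySem.Str.slice ln (some 2) none)) else h1)
    else ebsLoop fallback rest h2 h1

def extract_best_section_py_alt (full_text : String) (fallback : String) : String :=
  ebsLoop fallback (PySem.Str.splitlines full_text) none none

-- ===== PRECONDITION & SPEC =====
def Spec_extract_best_section_py (full_text : String) (fallback : String) (out : String) : Prop := out = extract_best_section_py_alt full_text fallback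
instance (full_text : String) (fallback : String) (out : String) : Decidable (Spec_extract_best_section_py full_text fallback out) := by unfold Spec_extract_best_section_py; infer_instance

-- ===== CLAIM (what is proved, stated in full; the proofs are below) =====
def Claim_equal_extract_best_section_py : Prop := ∀ (full_text : String) (fallback : String), Dom_extract_best_section_py full_text fallback → Spec_extract_best_section_py full_text fallback (extract_best_section_py full_text fallback)

-- ===== LEMMAS AND PROOFS =====

-- A's result, expressed on the filtered line list with pending candidates h2/h1.
def ebsRes (fallback : String) (lines : List String) (h2 h1 : Option String) : String :=
  match lines.find? (fun ln => PySem.Str.startswith ln "### ") with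
  | some ln => PySem.Str.strip (PySem.Str.slice ln (some 4) none)
  | none =>
    match h2.orElse (fun _ => (lines.find? (fun ln => PySem.Str.startswith ln "## ")).map
        (fun ln => PySem.Str.strip (PySem.Str.slice ln (some 3) none))) with
    | some s => s
    | none =>
      match h1.orElse (fun _ => (lines.find? (fun ln => PySem.Str.startswith ln "# ")).map
          (fun ln => PySem.Str.strip (PySem.Str.slice ln (some 2) none))) with
      | some s => s
      | none => fallback

theorem ebsLoop_eq_ebsRes (fallback : String) (raws : List String) (h2 h1 : Option String) :
    ebsLoop fallback raws h2 h1 =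
      ebsRes fallback (((raws.map PySem.Str.strip).filter (fun l => l != ""))) h2 h1 := by
  induction raws generalizing h2 h1 with
  | nil => cases h2 <;> cases h1 <;> simp [ebsLoop, ebsRes, Option.orElse]
  | cons raw rest ih =>
    by_cases he : PySem.Str.strip raw = ""
    · simp [ebsLoop, he, ih]
    · by_cases h3 : PySem.Chars.startswith (PySem.Chars.strip raw.toList) ['#', '#', '#', ' '] = true
      · simp [ebsLoop, ebsRes, he, h3]
      · by_cases hh2 : PySem.Chars.startswith (PySem.Chars.strip raw.toList) ['#', '#', ' '] = true
        · cases h2 <;>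
            simp [ebsLoop, ebsRes, he, h3, hh2, ih, Option.orElse]
        · by_cases hh1 : PySem.Chars.startswith (PySem.Chars.strip raw.toList) ['#', ' '] = true
          · cases h2 <;> cases h1 <;>
              simp [ebsLoop, ebsRes, he, h3, hh2, hh1, ih, Option.orElse]
          · simp [ebsLoop, ebsRes, he, h3, hh2, hh1, ih]

-- ===== VERDICT (by name: the statement is the Claim_ definition above) =====
theorem extract_best_section_py_spec : Claim_equal_extract_best_section_py := by
  intro full_text fallback _
  unfold Spec_extract_best_section_py extract_best_section_py extract_best_section_py_alt
  rw [ebsLoop_eq_ebsRes]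
  simp only [ebsRes, Option.orElse]
  rcases List.find? _ _ with _ | ln3
  · rcases List.find? _ _ with _ | ln2
    · rcases List.find? _ _ with _ | ln1 <;> simp
    · simp
  · simp
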